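-- pv_equiv track=rewrite | github.com/third-party-dev/newpath | py3/src/way/api.py | way_count
-- ===== SOURCE A (Python) =====
-- def way_count(path):
--     count = 0
--
--     if len(path) == 0:
--         return 0
--
--     for b in path:
--         if b == ':':
--             count += 1
--
--     if count > 0:
--         return count + 1
--
--     return 1
-- ===== SOURCE B (Python) =====
-- def _segments(s):
--     i = s.find(':')
--     if i < 0:
--         return 1
--     return 1 + _segments(s[i + 1:])
--
--
-- def way_count(path):
--     if path == '':
--         return 0
--     return _segments(path)
-- ===== Notes on version B (the rewrite author's own statement) =====
-- stated objective: alternative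
-- what changed: Replaces A's per-character tallying loop (with its count>0 branch) by a recursive find-and-jump decomposition: locate the first colon with str.find and recurse on the suffix after it, counting one segment per recursion step.
import Mathlib
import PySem

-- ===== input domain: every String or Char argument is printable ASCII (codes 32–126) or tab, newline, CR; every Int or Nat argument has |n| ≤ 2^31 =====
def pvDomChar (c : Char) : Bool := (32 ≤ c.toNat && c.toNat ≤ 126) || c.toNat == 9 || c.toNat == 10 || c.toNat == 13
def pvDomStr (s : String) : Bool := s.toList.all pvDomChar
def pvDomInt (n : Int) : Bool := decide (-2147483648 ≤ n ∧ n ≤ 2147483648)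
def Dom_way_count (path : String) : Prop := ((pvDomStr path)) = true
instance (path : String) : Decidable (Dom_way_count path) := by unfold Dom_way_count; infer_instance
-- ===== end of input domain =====

-- B replaces A's per-character tally loop by a recursive find-and-jump decomposition:
-- locate the first ':' with find and recurse on the suffix after it (objective: alternative).

-- ===== PORT A =====
def way_count (path : String) : Int :=
  if PySem.Str.len path = 0 then 0
  else
    let count : Int :=
      path.toList.foldl (fun acc b => if b == ':' then acc + 1 else acc) 0
    if count > 0 then count + 1 else 1

-- ===== PORT B =====
-- termination fact for waySegs, cited by the port's decreasing_by
theorem waySegs_drop_lt (l : List Char) (h : ¬ PySem.Chars.find l [':'] < 0) :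
    (l.drop ((PySem.Chars.find l [':']).toNat + 1)).length < l.length := by
  have hinf : [':'] <:+: l := (PySem.Chars.find_nonneg_iff l [':']).mp (by omega)
  have hne : l ≠ [] := by
    rintro rfl
    exact absurd (List.infix_nil.mp hinf) (List.cons_ne_nil _ _)
  have : 0 < l.length := List.length_pos_iff.mpr hne
  simp only [List.length_drop]
  omega

-- port of B's helper _segments (on the character list)
def waySegs (l : List Char) : Int :=
  let i := PySem.Chars.find l [':']
  if h : i < 0 then 1
  else 1 + waySegs (l.drop (i.toNat + 1))
termination_by l.length
decreasing_by exact waySegs_drop_lt l h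

def way_count_alt (path : String) : Int :=
  if path = "" then 0
  else waySegs path.toList

-- ===== PRECONDITION & SPEC =====
def Spec_way_count (path : String) (out : Int) : Prop := out = way_count_alt path
instance (path : String) (out : Int) : Decidable (Spec_way_count path out) := by unfold Spec_way_count; infer_instance

-- ===== CLAIM (what is proved, stated in full; the proofs are below) =====
def Claim_equal_way_count : Prop := ∀ (path : String), Dom_way_count path → Spec_way_count path (way_count path)

-- ===== LEMMAS AND PROOFS =====

-- find-and-jump counts 1 + (number of ':' in l)
theorem waySegs_eq_count (l : List Char) : waySegs l = 1 + (l.count ':' : Int) := by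
  induction l using (measure List.length).wf.induction with
  | _ l ih =>
    rw [waySegs]
    by_cases h : PySem.Chars.find l [':'] < 0
    · rw [dif_pos h]
      have hni : ¬ ([':'] <:+: l) := by
        intro hinf
        have := (PySem.Chars.find_nonneg_iff l [':']).mpr hinf
        omega
      have : ':' ∉ l := by
        intro hm
        obtain ⟨u, v, rfl⟩ := List.append_of_mem hm
        exact hni ⟨u, v, by simp⟩
      rw [List.count_eq_zero.mpr this]
      simp
    · rw [dif_neg h]
      set i := PySem.Chars.find l [':'] with hi
      have hnn : 0 ≤ i := by omega
      obtain ⟨hpre, hfirst⟩ := PySem.Chars.find_spec hnn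
      have hlt : i.toNat < l.length := by
        by_contra hge
        rw [List.drop_eq_nil_of_le (by omega)] at hpre
        simp at hpre
      obtain ⟨t, ht⟩ := hpre
      have h1 : l.drop (i.toNat + 1) = t := by
        have h2 : l.drop (i.toNat + 1) = (l.drop i.toNat).drop 1 := by
          rw [List.drop_drop]
        rw [h2, ← ht]
        rfl
      have hdrop : l.drop i.toNat = ':' :: l.drop (i.toNat + 1) := by
        rw [h1]
        exact ht.symm
      have hsplit : l = l.take i.toNat ++ ':' :: l.drop (i.toNat + 1) := by
        conv_lhs => rw [← List.take_append_drop i.toNat l]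
        rw [hdrop]
      have htake : (l.take i.toNat).count ':' = 0 := by
        rw [List.count_eq_zero]
        intro hm
        obtain ⟨j, hj, hjv⟩ := List.mem_iff_getElem.mp hm
        have hjlen : j < i.toNat := by
          simp [List.length_take] at hj
          omega
        have hjv' : l[j]'(by omega) = ':' := by
          rwa [List.getElem_take] at hjv
        apply hfirst j hjlen
        exact ⟨l.drop (j + 1), by
          show ':' :: l.drop (j + 1) = l.drop j
          rw [← hjv']
          exact List.getElem_cons_drop (by omega)⟩
      have hrec := ih (l.drop (i.toNat + 1)) (by
        show (l.drop (i.toNat + 1)).length < l.length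
        simp [List.length_drop]
        omega)
      rw [hrec]
      have hcount : l.count ':' = 1 + (l.drop (i.toNat + 1)).count ':' := by
        conv_lhs => rw [hsplit]
        simp [List.count_append, htake]
        omega
      rw [hcount]
      push_cast
      ring

-- A's foldl tally equals the count
theorem way_foldl_eq_count (l : List Char) :
    l.foldl (fun acc b => if b == ':' then acc + 1 else acc) (0 : Int) = (l.count ':' : Int) := by
  rw [PySem.List.foldl_beq_add_one]
  simp

-- ===== VERDICT (by name: the statement is the Claim_ definition above) =====
theorem way_count_spec : Claim_equal_way_count := by
  intro path _
  unfold Spec_way_count way_count way_count_alt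
  by_cases h : path = ""
  · subst h
    simp [PySem.Str.len]
  · have hlen : ¬ PySem.Str.len path = 0 := by
      simpa [PySem.Str.len] using h
    rw [if_neg hlen, if_neg h, waySegs_eq_count, way_foldl_eq_count]
    show (if ((path.toList.count ':' : Int)) > 0
            then ((path.toList.count ':' : Int)) + 1 else 1) =
          1 + (path.toList.count ':' : Int)
    split_ifs <;> omega
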